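/- GENERATED by farm/mkstatement.py from design/units.split.tsv — do not edit.
   THE SPLIT of the proof unit `decode_residue.1` into `decode_residue.1a`, `decode_residue.1b`, `decode_residue.1c`, `decode_residue.1d`: the children's statements give the parent's
   UNCHANGED statement (so nothing above the parent — callers, compositions — is touched by the split). -/
import Vorbis.Spec.DecodeResidue1
import Vorbis.Spec.Units.decode_residue_1
import Vorbis.Spec.Units.decode_residue_1a
import Vorbis.Spec.Units.decode_residue_1b
import Vorbis.Spec.Units.decode_residue_1c
import Vorbis.Spec.Units.decode_residue_1d
namespace Vorbis.Spec.Splits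
open X86 X86.User Asan

/-- The children of the split unit `decode_residue.1` prove it, by `Vorbis.Spec.DecodeResidue.Seg1.of_parts`. -/
theorem decode_residue_1
    (h_decode_residue_1a : Vorbis.Spec.decode_residue_1a.Statement)
    (h_decode_residue_1b : Vorbis.Spec.decode_residue_1b.Statement)
    (h_decode_residue_1c : Vorbis.Spec.decode_residue_1c.Statement)
    (h_decode_residue_1d : Vorbis.Spec.decode_residue_1d.Statement) :
    Vorbis.Spec.decode_residue_1.Statement := by
  intro Lay _hLay μ _hμ u₀ _hcode _h_asan_load8_noabort _h_asan_load2_noabort _h_asan_load1_noabort _h_asan_load4_noabort _h_setup_temp_malloc _h_make_block_array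
  apply Vorbis.Spec.DecodeResidue.Seg1.of_parts
  · exact h_decode_residue_1a Lay _hLay μ _hμ u₀ _hcode _h_asan_load8_noabort
  · exact h_decode_residue_1b Lay _hLay μ _hμ u₀ _hcode _h_asan_load8_noabort _h_asan_load2_noabort _h_asan_load1_noabort _h_asan_load4_noabort
  · exact h_decode_residue_1c Lay _hLay μ _hμ u₀ _hcode _h_asan_load8_noabort _h_asan_load4_noabort _h_setup_temp_malloc
  · exact h_decode_residue_1d Lay _hLay μ _hμ u₀ _hcode _h_make_block_array

end Vorbis.Spec.Splits
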